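-- pv_equiv track=rewrite | github.com/Lavish213/CRAVE | backend/app/services/menu/extraction/heuristics.py | contains_food_signal
-- ===== SOURCE A (Python) =====
-- FOOD_WORD_HINTS = {
--     "burger",
--     "pizza",
--     "taco",
--     "salad",
--     "sandwich",
--     "fries",
--     "chicken",
--     "beef",
--     "pork",
--     "rice",
--     "noodle",
--     "soup",
--     "ramen",
--     "sushi",
--     "roll",
--     "pasta",
--     "steak",
--     "shrimp",
--     "fish",
--     "curry",
--     "dumpling",
--     "bbq",
--     "burrito",
--     "quesadilla",
--     "nachos",
--     "pho",
--     "omelet",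
--     "pancake",
--     "waffle",
--     "dessert",
--     "cake",
--     "pie",
--     "ice cream",
--     "milkshake",
--     "latte",
--     "espresso",
--     "mocha",
--     "tea",
--     "smoothie",
-- }
--
-- def contains_food_signal(name: str) -> bool:
--
--     if not name:
--         return False
--
--     lower = name.lower()
--
--     for word in FOOD_WORD_HINTS:
--         if word in lower:
--             return True
--
--     return False
-- ===== SOURCE B (Python) =====
-- import re
--
-- # Single precompiled alternation: the regex engine makes one left-to-right pass
-- # over the lowered name, trying each alternative as a prefix at every position,
-- # instead of running one full substring search per keyword.
-- FOOD_PATTERN = ("burger|pizza|taco|salad|sandwich|fries|chicken|beef|pork|rice|"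
--                 "noodle|soup|ramen|sushi|roll|pasta|steak|shrimp|fish|curry|"
--                 "dumpling|bbq|burrito|quesadilla|nachos|pho|omelet|pancake|"
--                 "waffle|dessert|cake|pie|ice cream|milkshake|latte|espresso|"
--                 "mocha|tea|smoothie")
-- FOOD_RE = re.compile(FOOD_PATTERN)
--
--
-- def contains_food_signal(name: str) -> bool:
--     if not name:
--         return False
--     return FOOD_RE.search(name.lower()) is not None
-- ===== Notes on version B (the rewrite author's own statement) =====
-- stated objective: idiomatic
-- what changed: Replaces the per-keyword substring-search loop by a single precompiled alternation regex kept as one pattern string: one left-to-right scan of the lowered name, trying each alternative as a prefix at every position.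
import Mathlib
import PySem

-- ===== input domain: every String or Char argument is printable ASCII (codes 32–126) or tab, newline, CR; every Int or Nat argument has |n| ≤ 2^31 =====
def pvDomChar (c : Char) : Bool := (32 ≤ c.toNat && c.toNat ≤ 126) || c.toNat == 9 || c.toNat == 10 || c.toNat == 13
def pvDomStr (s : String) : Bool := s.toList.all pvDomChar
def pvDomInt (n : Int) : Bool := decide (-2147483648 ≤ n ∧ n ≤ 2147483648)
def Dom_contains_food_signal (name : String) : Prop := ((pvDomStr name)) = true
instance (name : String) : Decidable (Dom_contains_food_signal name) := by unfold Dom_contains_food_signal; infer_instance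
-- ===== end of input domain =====

-- B replaces A's per-keyword substring loop by one precompiled alternation pattern (a regex in
-- Python): a single left-to-right scan of the lowered name trying each alternative as a prefix
-- at every position; idiomatic, same result.


-- ===== PORT A =====
-- FOOD_WORD_HINTS: a Python set of string literals → List String of its distinct elements
def FOOD_WORD_HINTS : List String :=
  ["burger", "pizza", "taco", "salad", "sandwich", "fries", "chicken",
   "beef", "pork", "rice", "noodle", "soup", "ramen", "sushi", "roll",
   "pasta", "steak", "shrimp", "fish", "curry", "dumpling", "bbq",
   "burrito", "quesadilla", "nachos", "pho", "omelet", "pancake",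
   "waffle", "dessert", "cake", "pie", "ice cream", "milkshake",
   "latte", "espresso", "mocha", "tea", "smoothie"]

-- for word in FOOD_WORD_HINTS: if word in lower: return True — early-returning loop = any
def contains_food_signal (name : String) : Bool :=
  if name = "" then false
  else
    let lower := PySem.Str.lower name
    FOOD_WORD_HINTS.any (fun word => PySem.Str.isIn word lower)

-- ===== PORT B =====
-- B keeps the keywords as ONE alternation pattern string (the compiled regex's source)
def FOOD_PATTERN : String :=
  "burger|pizza|taco|salad|sandwich|fries|chicken|beef|pork|rice|noodle|soup|ramen|sushi|roll|pasta|steak|shrimp|fish|curry|dumpling|bbq|burrito|quesadilla|nachos|pho|omelet|pancake|waffle|dessert|cake|pie|ice cream|milkshake|latte|espresso|mocha|tea|smoothie"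

-- compiling the alternation = its list of literal alternatives (re.compile, done once in Python)
def foodAlternatives : List (List Char) :=
  PySem.Chars.splitOn FOOD_PATTERN.toList "|".toList

-- FOOD_RE.search: scan the text left to right, at each position trying every alternative as a
-- prefix; ported by hand (no Lean regex), exact for an alternation of literals.
def foodReSearch (alts : List (List Char)) : List Char → Bool
  | [] => alts.any (fun w => PySem.Chars.startswith [] w)
  | c :: rest => alts.any (fun w => PySem.Chars.startswith (c :: rest) w) || foodReSearch alts rest

def contains_food_signal_alt (name : String) : Bool :=
  if name = "" then false
  else foodReSearch foodAlternatives (PySem.Str.lower name).toList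

-- ===== PRECONDITION & SPEC =====
def Spec_contains_food_signal (name : String) (out : Bool) : Prop := out = contains_food_signal_alt name
instance (name : String) (out : Bool) : Decidable (Spec_contains_food_signal name out) := by unfold Spec_contains_food_signal; infer_instance

-- ===== CLAIM (what is proved, stated in full; the proofs are below) =====
def Claim_equal_contains_food_signal : Prop := ∀ (name : String), Dom_contains_food_signal name → Spec_contains_food_signal name (contains_food_signal name)

-- ===== LEMMAS AND PROOFS =====

-- splitting the pattern at '|' recovers exactly A's keyword list
set_option maxRecDepth 4000 in
theorem foodAlternatives_eq : foodAlternatives = FOOD_WORD_HINTS.map String.toList := by decide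

-- the scan finds an alternative iff some alternative is an infix of the text
theorem foodReSearch_iff (ws : List (List Char)) (s : List Char) :
    foodReSearch ws s = true ↔ ∃ w ∈ ws, w <:+: s := by
  induction s with
  | nil =>
    simp [foodReSearch, PySem.Chars.startswith_iff, List.any_eq_true,
      List.prefix_nil, List.infix_nil]
  | cons c rest ih =>
    simp only [foodReSearch, Bool.or_eq_true, List.any_eq_true, ih,
      PySem.Chars.startswith_iff]
    constructor
    · rintro (⟨w, hw, hp⟩ | ⟨w, hw, hi⟩)
      · exact ⟨w, hw, hp.isInfix⟩
      · exact ⟨w, hw, List.infix_cons hi⟩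
    · rintro ⟨w, hw, hi⟩
      rcases List.infix_cons_iff.mp hi with hp | hs
      · exact Or.inl ⟨w, hw, hp⟩
      · exact Or.inr ⟨w, hw, hs⟩

-- ===== VERDICT (by name: the statement is the Claim_ definition above) =====
theorem contains_food_signal_spec : Claim_equal_contains_food_signal := by
  intro name _
  unfold Spec_contains_food_signal contains_food_signal contains_food_signal_alt
  by_cases h : name = ""
  · simp [h]
  · simp only [h, if_false]
    rw [Bool.eq_iff_iff]
    simp only [List.any_eq_true, foodReSearch_iff, foodAlternatives_eq, List.mem_map,
      PySem.Str.isIn_iff_infix]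
    constructor
    · rintro ⟨w, hw, hi⟩; exact ⟨w.toList, ⟨w, hw, rfl⟩, hi⟩
    · rintro ⟨w', ⟨w, hw, rfl⟩, hi⟩; exact ⟨w, hw, hi⟩
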